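-- pv_equiv track=rewrite | github.com/Anqeliccom/Algorithms | 08.py | isIdealPermutation
-- ===== SOURCE A (Python) =====
-- def isIdealPermutation(nums):
--     local_inversions = sum([1 for i in range(len(nums) - 1) if nums[i] > nums[i + 1]])
--
--     def merge_and_count_split(left, right, res):
--         lsize, rsize = len(left), len(right)
--         n = len(res)
--
--         i, j, k = 0, 0, 0
--
--         split_count = 0
--
--         while k < n and i < lsize and j < rsize:
--             if left[i] <= right[j]:
--                 res[k] = left[i]
--                 k += 1
--                 i += 1
--             else:
--                 res[k] = right[j]
--                 k += 1
--                 j += 1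
--                 split_count += lsize - i
--
--         while i < lsize:
--             res[k] = left[i]
--             k += 1
--             i += 1
--
--         while j < rsize:
--             res[k] = right[j]
--             k += 1
--             j += 1
--
--         return split_count, res
--
--     def sort_and_count_inversions(array):
--         if len(array) == 1:
--             return 0, array
--
--         middle = len(array) // 2
--
--         left_count, left = sort_and_count_inversions(array[:middle])
--         right_count, right = sort_and_count_inversions(array[middle:])
--
--         buffer = [0] * len(array)
--
--         split, result = merge_and_count_split(left, right, buffer)
--
--         for i in range(len(array)):
--             array[i] = result[i]
--
--         return left_count + right_count + split, array
--
--     global_inversions, _ = sort_and_count_inversions(nums)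
--     return global_inversions == local_inversions
-- ===== SOURCE B (Python) =====
-- def isIdealPermutation(nums):
--     # One O(n) pass: the answer is True iff there is no inversion with gap >= 2,
--     # i.e. the running max of nums[0..j-2] never exceeds nums[j].
--     if len(nums) < 3:
--         return True
--     mx = nums[0]
--     for j in range(2, len(nums)):
--         if mx > nums[j]:
--             return False
--         if nums[j - 1] > mx:
--             mx = nums[j - 1]
--     return True
-- ===== Notes on version B (the rewrite author's own statement) =====
-- stated objective: faster
-- what changed: Replaced the merge-sort inversion count (compared against the adjacent-inversion count) by a single linear scan that keeps the running maximum of elements two or more positions back and fails on the first non-adjacent inversion.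
import Mathlib
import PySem

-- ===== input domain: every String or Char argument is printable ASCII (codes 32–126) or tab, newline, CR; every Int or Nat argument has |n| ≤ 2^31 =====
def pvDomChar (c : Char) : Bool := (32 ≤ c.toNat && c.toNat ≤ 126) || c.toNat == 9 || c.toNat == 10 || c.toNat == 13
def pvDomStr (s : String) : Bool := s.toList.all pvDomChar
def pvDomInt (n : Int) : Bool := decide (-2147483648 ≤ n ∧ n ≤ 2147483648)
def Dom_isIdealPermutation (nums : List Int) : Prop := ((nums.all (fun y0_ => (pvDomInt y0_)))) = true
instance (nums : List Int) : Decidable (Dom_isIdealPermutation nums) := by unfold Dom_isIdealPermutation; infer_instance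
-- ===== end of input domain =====

-- B replaces A's merge-sort inversion count by a single linear running-max scan (asymptotically
-- faster); equivalence is about the RETURN value only — Python A sorts `nums` in place, B does not.

-- ===== PORT A =====
-- merge_and_count_split: the index/buffer while-loops become the structural recursion over the
-- same two lists (exact: the buffer has length lsize + rsize, so `k < n` never cuts the loop);
-- `split_count += lsize - i` is the `+ (xs.length + 1)` (remaining left part x :: xs) below.
def pvMergeCount : List Int → List Int → Nat × List Int
  | [], r => (0, r)
  | l, [] => (0, l)
  | x :: xs, y :: ys =>
    if x ≤ y then
      let p := pvMergeCount xs (y :: ys)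
      (p.1, x :: p.2)
    else
      let p := pvMergeCount (x :: xs) ys
      (p.1 + (xs.length + 1), y :: p.2)

-- sort_and_count_inversions; the `≤ 1` guard (Python tests `== 1`) only makes the recursion
-- total on [], where Python A never returns (RecursionError; excluded by Pre_).
def pvSortCount (a : List Int) : Nat × List Int :=
  if a.length ≤ 1 then (0, a)
  else
    let m := a.length / 2
    let p := pvSortCount (a.take m)
    let q := pvSortCount (a.drop m)
    let r := pvMergeCount p.2 q.2
    (p.1 + q.1 + r.1, r.2)
termination_by a.length
decreasing_by
  · simp only [List.length_take]; omega
  · simp only [List.length_drop]; omega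

def isIdealPermutation (nums : List Int) : Bool :=
  -- sum([1 for i in range(len(nums)-1) if nums[i] > nums[i+1]]); every index is in range,
  -- so getD is exact for nums[i]
  let localInv := ((List.range (nums.length - 1)).filter
      (fun i => decide (nums.getD i 0 > nums.getD (i + 1) 0))).length
  decide ((pvSortCount nums).1 = localInv)

-- ===== PORT B =====
-- the for-loop with early return; mx = running max of elements two or more positions back
def pvAltGo (mx prev : Int) : List Int → Bool
  | [] => true
  | x :: xs => if mx > x then false else pvAltGo (if prev > mx then prev else mx) x xs

def isIdealPermutation_alt (nums : List Int) : Bool :=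
  match nums with
  | a :: b :: rest => pvAltGo a b rest
  | _ => true

-- ===== PRECONDITION & SPEC =====
-- Pre_ excludes only the empty list, on which Python A raises RecursionError
-- (sort_and_count_inversions recurses forever on length 0).
def Pre_isIdealPermutation (nums : List Int) : Prop := nums ≠ []
instance (nums : List Int) : Decidable (Pre_isIdealPermutation nums) := by
  unfold Pre_isIdealPermutation; infer_instance

def pvWitness_isIdealPermutation : List Int := [1, 0, 2]

def Spec_isIdealPermutation (nums : List Int) (out : Bool) : Prop := out = isIdealPermutation_alt nums
instance (nums : List Int) (out : Bool) : Decidable (Spec_isIdealPermutation nums out) := by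
  unfold Spec_isIdealPermutation; infer_instance

-- ===== CLAIM (what is proved, stated in full; the proofs are below) =====
def Claim_equal_isIdealPermutation : Prop := ∀ (nums : List Int), Dom_isIdealPermutation nums → Pre_isIdealPermutation nums → Spec_isIdealPermutation nums (isIdealPermutation nums)


-- ===== LEMMAS AND PROOFS =====

-- total number of inversion pairs (i < j with l[i] > l[j]), structurally
def pvInv : List Int → Nat
  | [] => 0
  | x :: xs => xs.countP (fun y => decide (y < x)) + pvInv xs

-- number of adjacent inversions
def pvAdj : List Int → Nat
  | x :: y :: xs => (if y < x then 1 else 0) + pvAdj (y :: xs)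
  | _ => 0

-- number of non-adjacent inversions (gap ≥ 2)
def pvNadj : List Int → Nat
  | [] => 0
  | x :: xs => xs.tail.countP (fun y => decide (y < x)) + pvNadj xs

-- cross inversions: pairs (x from l, y from r) with x > y
def pvCross (l r : List Int) : Nat := (l.map (fun x => r.countP (fun y => decide (y < x)))).sum

theorem pvMergeCount_snd (l r : List Int) :
    (pvMergeCount l r).2 = l.merge r (fun a b => decide (a ≤ b)) := by
  induction l, r using pvMergeCount.induct with
  | case1 r => simp [pvMergeCount]
  | case2 l h => simp [pvMergeCount]
  | case3 x xs y ys hle ih => simp [pvMergeCount, hle, ih]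
  | case4 x xs y ys hle ih => simp [pvMergeCount, hle, ih]

theorem pvMergeCount_perm (l r : List Int) : ((pvMergeCount l r).2).Perm (l ++ r) := by
  rw [pvMergeCount_snd]; exact List.merge_perm_append _

theorem pvMergeCount_sorted (l r : List Int)
    (hl : List.Pairwise (· ≤ ·) l) (hr : List.Pairwise (· ≤ ·) r) :
    List.Pairwise (· ≤ ·) (pvMergeCount l r).2 := by
  rw [pvMergeCount_snd]
  have := List.pairwise_merge (le := fun a b : Int => decide (a ≤ b))
    (fun a b c hab hbc => by simp_all; omega)
    (fun a b => by simp; omega) l r (by simpa using hl) (by simpa using hr)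
  simpa using this

theorem pvMergeCount_fst (l r : List Int)
    (hl : List.Pairwise (· ≤ ·) l) (hr : List.Pairwise (· ≤ ·) r) :
    (pvMergeCount l r).1 = pvCross l r := by
  induction l, r using pvMergeCount.induct with
  | case1 r => simp [pvMergeCount, pvCross]
  | case2 l h => simp [pvMergeCount, pvCross]
  | case3 x xs y ys hle ih =>
    simp only [pvMergeCount, if_pos hle]
    rw [ih hl.tail hr]
    have h0 : (y :: ys).countP (fun z => decide (z < x)) = 0 := by
      rw [List.countP_eq_zero]
      intro z hz
      rcases List.mem_cons.mp hz with h | h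
      · subst h; simp; omega
      · have := (List.pairwise_cons.mp hr).1 z h; simp; omega
    simp [pvCross, h0]
  | case4 x xs y ys hle ih =>
    simp only [pvMergeCount, if_neg hle]
    rw [ih hl hr.tail]
    have hxy : y < x := by omega
    have hfull : ∀ z ∈ x :: xs, y < z := by
      intro z hz
      rcases List.mem_cons.mp hz with h | h
      · omega
      · have := (List.pairwise_cons.mp hl).1 z h; omega
    have hpt : ∀ z ∈ x :: xs,
        (y :: ys).countP (fun w => decide (w < z)) =
        ys.countP (fun w => decide (w < z)) + 1 := by
      intro z hz
      simp [hfull z hz]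
    simp only [pvCross]
    rw [List.map_congr_left hpt]
    have hsum : ∀ (m : List Int),
        (m.map (fun z => ys.countP (fun w => decide (w < z)) + 1)).sum =
        (m.map (fun z => ys.countP (fun w => decide (w < z)))).sum + m.length := by
      intro m
      induction m with
      | nil => simp
      | cons a as iha => simp only [List.map_cons, List.sum_cons, List.length_cons]; omega
    rw [hsum]
    simp only [List.length_cons]

theorem pvCross_perm {l l' r r' : List Int} (h1 : l.Perm l') (h2 : r.Perm r') :
    pvCross l r = pvCross l' r' := by
  unfold pvCross
  have hmap : ∀ m : List Int,
      (m.map (fun x => r.countP (fun y => decide (y < x)))) =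
      (m.map (fun x => r'.countP (fun y => decide (y < x)))) := by
    intro m
    exact List.map_congr_left (fun x _ => h2.countP_eq _)
  rw [hmap l]
  exact (h1.map _).sum_eq

theorem pvInv_append (l r : List Int) :
    pvInv (l ++ r) = pvInv l + pvInv r + pvCross l r := by
  induction l with
  | nil => simp [pvInv, pvCross]
  | cons x xs ih =>
    simp only [List.cons_append, pvInv, List.countP_append, ih, pvCross, List.map_cons,
      List.sum_cons]
    omega

theorem pvSortCount_correct_aux : ∀ (n : Nat) (a : List Int), a.length ≤ n →
    (pvSortCount a).1 = pvInv a ∧ ((pvSortCount a).2).Perm a ∧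
      List.Pairwise (· ≤ ·) (pvSortCount a).2 := by
  intro n
  induction n with
  | zero =>
    intro a ha
    match a, ha with
    | [], _ =>
      rw [pvSortCount, if_pos (by simp)]
      exact ⟨rfl, List.Perm.refl _, List.Pairwise.nil⟩
  | succ n ih =>
    intro a ha
    by_cases h : a.length ≤ 1
    · rw [pvSortCount, if_pos h]
      match a, h with
      | [], _ => exact ⟨rfl, List.Perm.refl _, List.Pairwise.nil⟩
      | [x], _ => exact ⟨rfl, List.Perm.refl _, by simp⟩
    · rw [pvSortCount, if_neg h]
      dsimp only
      obtain ⟨hc1, hp1, hs1⟩ := ih (a.take (a.length / 2))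
        (by simp only [List.length_take]; omega)
      obtain ⟨hc2, hp2, hs2⟩ := ih (a.drop (a.length / 2))
        (by simp only [List.length_drop]; omega)
      have hsplit : a.take (a.length / 2) ++ a.drop (a.length / 2) = a :=
        List.take_append_drop _ a
      have hcross : (pvMergeCount (pvSortCount (a.take (a.length / 2))).2
          (pvSortCount (a.drop (a.length / 2))).2).1 =
          pvCross (a.take (a.length / 2)) (a.drop (a.length / 2)) := by
        rw [pvMergeCount_fst _ _ hs1 hs2]
        exact pvCross_perm hp1 hp2
      refine ⟨?_, ?_, ?_⟩
      · rw [hc1, hc2, hcross]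
        have := pvInv_append (a.take (a.length / 2)) (a.drop (a.length / 2))
        rw [hsplit] at this
        omega
      · have := (pvMergeCount_perm (pvSortCount (a.take (a.length / 2))).2
          (pvSortCount (a.drop (a.length / 2))).2).trans (hp1.append hp2)
        rwa [hsplit] at this
      · exact pvMergeCount_sorted _ _ hs1 hs2

theorem pvSortCount_correct (a : List Int) :
    (pvSortCount a).1 = pvInv a ∧ ((pvSortCount a).2).Perm a ∧
      List.Pairwise (· ≤ ·) (pvSortCount a).2 :=
  pvSortCount_correct_aux a.length a le_rfl

-- A's index-based adjacent-inversion count equals the structural one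
theorem pvLocal_eq_adj (nums : List Int) :
    ((List.range (nums.length - 1)).filter
      (fun i => decide (nums.getD i 0 > nums.getD (i + 1) 0))).length = pvAdj nums := by
  induction nums with
  | nil => simp [pvAdj]
  | cons x xs ih =>
    cases xs with
    | nil => simp [pvAdj]
    | cons y ys =>
      have hlen : (x :: y :: ys : List Int).length - 1 = ys.length + 1 := by simp
      rw [hlen, List.range_succ_eq_map, List.filter_cons]
      have hcomp : ∀ i ∈ List.range ys.length,
          ((fun i => decide (List.getD (x :: y :: ys) i 0 > List.getD (x :: y :: ys) (i + 1) 0))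
            ∘ Nat.succ) i =
          (fun i => decide (List.getD (y :: ys) i 0 > List.getD (y :: ys) (i + 1) 0)) i := by
        intro i _
        simp
      have hrest : ((List.map Nat.succ (List.range ys.length)).filter
          (fun i => decide (List.getD (x :: y :: ys) i 0 > List.getD (x :: y :: ys) (i + 1) 0))).length
          = pvAdj (y :: ys) := by
        rw [List.filter_map, List.length_map, List.filter_congr hcomp]
        have : (y :: ys : List Int).length - 1 = ys.length := by simp
        rw [← this, ih]
      by_cases hxy : (y : Int) < x
      · rw [if_pos (by simp [hxy])]
        simp only [List.length_cons, hrest, pvAdj, if_pos hxy]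
        omega
      · rw [if_neg (by simp at hxy ⊢; omega)]
        simp only [hrest, pvAdj, if_neg hxy]
        omega

theorem pvInv_split (l : List Int) : pvInv l = pvAdj l + pvNadj l := by
  induction l with
  | nil => rfl
  | cons x xs ih =>
    match xs with
    | [] => rfl
    | y :: ys =>
      simp only [pvInv, pvAdj, pvNadj, List.countP_cons, List.tail_cons] at *
      by_cases h : y < x <;> simp [h] <;> omega

theorem pvAltGo_iff (mx prev : Int) (xs : List Int) :
    pvAltGo mx prev xs = true ↔ ((∀ y ∈ xs, mx ≤ y) ∧ pvNadj (prev :: xs) = 0) := by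
  induction xs generalizing mx prev with
  | nil => simp [pvAltGo, pvNadj]
  | cons x xs ih =>
    simp only [pvAltGo]
    by_cases hmx : mx > x
    · simp only [if_pos hmx]
      constructor
      · intro h; exact absurd h (by simp)
      · rintro ⟨h, -⟩
        exact absurd (h x (by simp)) (by omega)
    · rw [if_neg hmx, ih]
      have hmax : ∀ y : Int, (if prev > mx then prev else mx) ≤ y ↔ (mx ≤ y ∧ prev ≤ y) := by
        intro y; split <;> omega
      constructor
      · rintro ⟨h1, h2⟩
        refine ⟨?_, ?_⟩
        · intro y hy
          rcases List.mem_cons.mp hy with h | h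
          · omega
          · exact ((hmax y).mp (h1 y h)).1
        · simp only [pvNadj, List.tail_cons] at h2 ⊢
          have : xs.countP (fun y => decide (y < prev)) = 0 := by
            rw [List.countP_eq_zero]
            intro y hy
            have := ((hmax y).mp (h1 y hy)).2
            simp; omega
          have hx : pvNadj (x :: xs) = xs.tail.countP (fun y => decide (y < x)) + pvNadj xs := rfl
          omega
      · rintro ⟨h1, h2⟩
        simp only [pvNadj, List.tail_cons] at h2
        have hx : pvNadj (x :: xs) = xs.tail.countP (fun y => decide (y < x)) + pvNadj xs := rfl
        have hcnt : xs.countP (fun y => decide (y < prev)) = 0 ∧ pvNadj (x :: xs) = 0 := by omega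
        refine ⟨?_, ?_⟩
        · intro y hy
          rw [hmax y]
          constructor
          · exact h1 y (List.mem_cons_of_mem _ hy)
          · have := List.countP_eq_zero.mp hcnt.1 y hy
            simp at this; omega
        · simpa [pvNadj] using hcnt.2

theorem pvAlt_iff (nums : List Int) : isIdealPermutation_alt nums = true ↔ pvNadj nums = 0 := by
  match nums with
  | [] => simp [isIdealPermutation_alt, pvNadj]
  | [a] => simp [isIdealPermutation_alt, pvNadj]
  | a :: b :: rest =>
    show pvAltGo a b rest = true ↔ _
    rw [pvAltGo_iff]
    simp only [pvNadj, List.tail_cons]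
    have hb : pvNadj (b :: rest) = rest.tail.countP (fun y => decide (y < b)) + pvNadj rest := rfl
    constructor
    · rintro ⟨h1, h2⟩
      have : rest.countP (fun y => decide (y < a)) = 0 := by
        rw [List.countP_eq_zero]
        intro y hy
        have := h1 y hy
        simp; omega
      omega
    · intro h
      have hcnt : rest.countP (fun y => decide (y < a)) = 0 ∧ pvNadj (b :: rest) = 0 := by omega
      refine ⟨fun y hy => ?_, hcnt.2⟩
      have := List.countP_eq_zero.mp hcnt.1 y hy
      simp at this; omega

-- ===== VERDICT (by name: the statement is the Claim_ definition above) =====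
theorem isIdealPermutation_spec : Claim_equal_isIdealPermutation := by
  intro nums _hdom _hpre
  unfold Spec_isIdealPermutation isIdealPermutation
  rw [pvLocal_eq_adj, (pvSortCount_correct nums).1]
  rcases h : isIdealPermutation_alt nums with hf | ht
  · have := (not_iff_not.mpr (pvAlt_iff nums)).mp (by simp [h])
    simp only [decide_eq_false_iff_not]
    rw [pvInv_split]
    omega
  · have := (pvAlt_iff nums).mp h
    simp only [decide_eq_true_eq]
    rw [pvInv_split]
    omega
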